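/- GENERATED by farm/mkstatement.py from design/units.tsv (unit `DGifDecompressLine.3`) and the assertions of Gif/Spec/Seg_DGifDecompressLine.lean — do not edit.
   THE STATEMENT of the proof unit `DGifDecompressLine.3`: segment 3 of `DGifDecompressLine` (16 instructions; entries 0x106f7d;
   exits 0x106fa0,0x10709d; ranges 0x106f7d-0x106fa0,0x107080-0x107098,0x1070ba-0x1070c1)
   takes each of its entry assertions to one of its exit assertions (`Gif.Spec.DGifDecompressLine.Seg3`), given the contracts of its callees.
   What the names mean: ProgX/Base/Spec/Basic.lean (the shared hypotheses), Gif/Spec/Seg_DGifDecompressLine.lean (the assertions). The theorem to prove: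
   `theorem DGifDecompressLine_3_ok : Gif.Spec.DGifDecompressLine_3.Statement`. -/
import Gif.Code
import Gif.Dec.All
import Gif.Labels
import Gif.Spec.Lzw
import Gif.Spec.Seg_DGifDecompressLine
namespace Gif.Spec.DGifDecompressLine_3
open X86 X86.User Asan

/-- The statement of unit `DGifDecompressLine.3`. -/
def Statement : Prop :=
  ∀ (Lay : Layout) (_hLay : Lay.hi = 0x1000000) (μ : Microarch) (_hμ : UserX.MicroOK μ) (u₀ : State)
    (_hcode : HasCodeNat Lay u₀ Gif.L.DGifDecompressLine.entry Gif.Code.code_DGifDecompressLine.nat Gif.L.DGifDecompressLine.size)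
    (_h_DGifDecompressInput : ∀ (H : Heap) (rest : List Obj) (frames : List (Nat × FrameLayout)) (F : Forest) (R : Rd), Calls Lay μ ProgX.Base.WayInv (ProgX.Base.conv u₀) Gif.L.DGifDecompressInput.entry (Gif.Spec.DGifDecompressInput.spec H rest frames F R)),
    Gif.Spec.DGifDecompressLine.Seg3 Lay μ u₀

end Gif.Spec.DGifDecompressLine_3
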